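-- pv_equiv track=rewrite | github.com/antoinedandi/FaceMorphing | utils/utils.py | create_morphing_lists
-- ===== SOURCE A (Python) =====
-- def create_morphing_lists(l):
--     l1 = []
--     l2 = []
--     for i in range(len(l)):
--         for j in range(i, len(l)):
--             l1.append(l[i])
--             l2.append(l[j])
--     assert len(l1) == len(l2)
--     return l1, l2
-- ===== SOURCE B (Python) =====
-- def create_morphing_lists(l):
--     # Single backward pass: walk l in reverse, grow the current suffix one
--     # element at a time, collect the rows back-to-front, then flatten once.
--     rows1, rows2, suffix = [], [], []
--     for x in reversed(l):
--         suffix = [x] + suffix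
--         rows1.append([x] * len(suffix))
--         rows2.append(suffix)
--     l1 = [v for row in reversed(rows1) for v in row]
--     l2 = [v for row in reversed(rows2) for v in row]
--     return l1, l2
-- ===== Notes on version B (the rewrite author's own statement) =====
-- stated objective: alternative
-- what changed: Replaces the forward nested index loop with a single backward pass that maintains the growing suffix as an accumulator, collects the rows back-to-front, and flattens them once; no indexing and no inner index loop.
import Mathlib
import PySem

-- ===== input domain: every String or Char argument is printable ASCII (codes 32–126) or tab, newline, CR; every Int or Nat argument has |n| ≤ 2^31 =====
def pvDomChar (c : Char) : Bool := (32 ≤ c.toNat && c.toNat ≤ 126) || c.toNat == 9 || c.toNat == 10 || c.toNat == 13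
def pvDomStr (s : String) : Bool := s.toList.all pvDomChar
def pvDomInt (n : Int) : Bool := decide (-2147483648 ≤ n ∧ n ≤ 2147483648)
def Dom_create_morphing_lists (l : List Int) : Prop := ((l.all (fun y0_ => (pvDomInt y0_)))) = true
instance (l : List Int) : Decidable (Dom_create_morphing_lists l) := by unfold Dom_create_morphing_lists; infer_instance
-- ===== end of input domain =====

-- B replaces A's forward nested index loop by a single backward pass that grows the
-- suffix as an accumulator the suffix as an accumulator, collects the rows back-to-front and flattens once
-- (objective: alternative decomposition).

-- ===== PORT A =====
-- for i in range(len(l)): for j in range(i, len(l)): l1.append(l[i]); l2.append(l[j])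
def create_morphing_lists (l : List Int) : List Int × List Int :=
  (PySem.List.pyRange 0 (l.length : Int)).foldl (fun acc i =>
    (PySem.List.pyRange i (l.length : Int)).foldl (fun acc2 j =>
      (acc2.1 ++ [PySem.List.pyGetD l i 0], acc2.2 ++ [PySem.List.pyGetD l j 0])) acc)
    ([], [])

-- ===== PORT B =====
-- for x in reversed(l): suffix = [x]+suffix; rows1.append([x]*len(suffix)); rows2.append(suffix)
-- then flatten reversed(rows1), reversed(rows2)
def create_morphing_lists_alt (l : List Int) : List Int × List Int :=
  let s := l.reverse.foldl (fun (st : List (List Int) × List (List Int) × List Int) x =>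
    let suffix := x :: st.2.2
    (st.1 ++ [List.replicate suffix.length x], st.2.1 ++ [suffix], suffix)) ([], [], [])
  (s.1.reverse.flatMap id, s.2.1.reverse.flatMap id)

-- ===== PRECONDITION & SPEC =====
def Spec_create_morphing_lists (l : List Int) (out : List Int × List Int) : Prop := out = create_morphing_lists_alt l
instance (l : List Int) (out : List Int × List Int) : Decidable (Spec_create_morphing_lists l out) := by unfold Spec_create_morphing_lists; infer_instance

-- ===== CLAIM (what is proved, stated in full; the proofs are below) =====
def Claim_equal_create_morphing_lists : Prop := ∀ (l : List Int), Dom_create_morphing_lists l → Spec_create_morphing_lists l (create_morphing_lists l)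

-- ===== LEMMAS AND PROOFS =====

-- pyRange with Nat-cast endpoints and step 1, spelled out as a map over List.range
lemma pyRange_nat (k n : Nat) :
    PySem.List.pyRange (k : Int) (n : Int) = (List.range (n - k)).map (fun j => ((k + j : Nat) : Int)) := by
  have hstep : ¬ ((1:Int) = 0) := by norm_num
  have hpos : (0:Int) < 1 := by norm_num
  have harith : ((n : Int) - k + 1 - 1) / 1 = (n : Int) - k := by rw [Int.ediv_one]; ring
  simp only [PySem.List.pyRange, if_neg hstep, if_pos hpos, harith]
  by_cases h : k < n
  · rw [if_pos (by exact_mod_cast h)]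
    have h3 : ((n : Int) - k).toNat = n - k := by omega
    rw [h3]
    apply List.map_congr_left
    intro j _
    push_cast
    ring
  · rw [if_neg (by omega)]
    have h4 : n - k = 0 := by omega
    simp [h4]

-- A's inner loop, as two appended maps
lemma A_inner (l : List Int) (n i : Int) (acc : List Int × List Int) :
    (PySem.List.pyRange i n).foldl (fun acc2 j =>
        (acc2.1 ++ [PySem.List.pyGetD l i 0], acc2.2 ++ [PySem.List.pyGetD l j 0])) acc
      = (acc.1 ++ (PySem.List.pyRange i n).map (fun _ => PySem.List.pyGetD l i 0),
         acc.2 ++ (PySem.List.pyRange i n).map (fun j => PySem.List.pyGetD l j 0)) := by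
  obtain ⟨a, b⟩ := acc
  rw [PySem.List.foldl_prod_mk (f := fun s _ => s ++ [PySem.List.pyGetD l i 0])
        (g := fun s j => s ++ [PySem.List.pyGetD l j 0])]
  rw [PySem.List.foldl_append_singleton_eq_map, PySem.List.foldl_append_singleton_eq_map]

-- A's whole double loop, as a pair of flatMaps
lemma A_eq (l : List Int) : create_morphing_lists l =
    ((PySem.List.pyRange 0 (l.length : Int)).flatMap
        (fun i => (PySem.List.pyRange i (l.length : Int)).map (fun _ => PySem.List.pyGetD l i 0)),
     (PySem.List.pyRange 0 (l.length : Int)).flatMap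
        (fun i => (PySem.List.pyRange i (l.length : Int)).map (fun j => PySem.List.pyGetD l j 0))) := by
  unfold create_morphing_lists
  have hbody : (fun (acc : List Int × List Int) (i : Int) =>
        (PySem.List.pyRange i (l.length : Int)).foldl (fun acc2 j =>
          (acc2.1 ++ [PySem.List.pyGetD l i 0], acc2.2 ++ [PySem.List.pyGetD l j 0])) acc)
      = (fun (acc : List Int × List Int) (i : Int) =>
          (acc.1 ++ (PySem.List.pyRange i (l.length : Int)).map (fun _ => PySem.List.pyGetD l i 0),
           acc.2 ++ (PySem.List.pyRange i (l.length : Int)).map (fun j => PySem.List.pyGetD l j 0))) := by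
    funext acc i
    exact A_inner l (l.length : Int) i acc
  rw [hbody]
  rw [PySem.List.foldl_prod_mk
        (f := fun s i => s ++ (PySem.List.pyRange i (l.length : Int)).map (fun _ => PySem.List.pyGetD l i 0))
        (g := fun s i => s ++ (PySem.List.pyRange i (l.length : Int)).map (fun j => PySem.List.pyGetD l j 0))]
  rw [PySem.List.foldl_append_eq_flatMap, PySem.List.foldl_append_eq_flatMap]
  simp

-- canonical forms of the two lists, used as middle terms
def rows1 (l : List Int) : List Int :=
  (List.range l.length).flatMap (fun k => List.replicate (l.length - k) (l.getD k 0))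
def rows2 (l : List Int) : List Int :=
  (List.range l.length).flatMap (fun k => l.drop k)

-- first components of A agree with rows1
lemma first_eq (l : List Int) :
    (PySem.List.pyRange 0 (l.length : Int)).flatMap
        (fun i => (PySem.List.pyRange i (l.length : Int)).map (fun _ => PySem.List.pyGetD l i 0))
      = rows1 l := by
  unfold rows1
  rw [PySem.List.pyRange_zero_natCast, List.flatMap_map]
  rw [List.flatMap_def, List.flatMap_def]
  congr 1
  apply List.map_congr_left
  intro k _
  rw [pyRange_nat, PySem.List.pyGetD_natCast]
  simp [Function.comp_def, List.map_const']

-- second components of A agree with rows2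
lemma map_getD_range (l : List Int) (k : Nat) (hk : k ≤ l.length) :
    (List.range (l.length - k)).map (fun j => l.getD (k + j) 0) = l.drop k := by
  apply List.ext_getElem
  · simp
  · intro i h1 h2
    simp only [List.getElem_map, List.getElem_range, List.getElem_drop]
    have hlen : k + i < l.length := by simp at h1; omega
    rw [List.getD_eq_getElem l 0 hlen]

lemma second_eq (l : List Int) :
    (PySem.List.pyRange 0 (l.length : Int)).flatMap
        (fun i => (PySem.List.pyRange i (l.length : Int)).map (fun j => PySem.List.pyGetD l j 0))
      = rows2 l := by
  unfold rows2
  rw [PySem.List.pyRange_zero_natCast, List.flatMap_map]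
  rw [List.flatMap_def, List.flatMap_def]
  congr 1
  apply List.map_congr_left
  intro k hk
  rw [pyRange_nat, List.map_map]
  have hk' : k ≤ l.length := le_of_lt (List.mem_range.mp hk)
  rw [← map_getD_range l k hk']
  apply List.map_congr_left
  intro j _
  simp only [Function.comp_apply]
  rw [PySem.List.pyGetD_natCast]

-- rows of the two lists, used as middle terms
def rowsL1 (l : List Int) : List (List Int) :=
  (List.range l.length).map (fun k => List.replicate (l.length - k) (l.getD k 0))
def rowsL2 (l : List Int) : List (List Int) :=
  (List.range l.length).map (fun k => l.drop k)

lemma rowsL1_cons (x : Int) (xs : List Int) :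
    rowsL1 (x :: xs) = List.replicate (xs.length + 1) x :: rowsL1 xs := by
  unfold rowsL1
  rw [List.length_cons, List.range_succ_eq_map, List.map_cons, List.map_map]
  simp [Nat.succ_sub_succ]

lemma rowsL2_cons (x : Int) (xs : List Int) :
    rowsL2 (x :: xs) = (x :: xs) :: rowsL2 xs := by
  unfold rowsL2
  rw [List.length_cons, List.range_succ_eq_map, List.map_cons, List.map_map]
  simp

lemma rows1_flat (l : List Int) : (rowsL1 l).flatMap id = rows1 l := by
  unfold rowsL1 rows1; rw [List.flatMap_map]; rfl

lemma rows2_flat (l : List Int) : (rowsL2 l).flatMap id = rows2 l := by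
  unfold rowsL2 rows2; rw [List.flatMap_map]; rfl

-- B's backward fold, as structural recursion via foldr; its full invariant
lemma B_fold_eq (l : List Int) :
    l.reverse.foldl (fun (st : List (List Int) × List (List Int) × List Int) x =>
        (st.1 ++ [List.replicate (x :: st.2.2).length x], st.2.1 ++ [x :: st.2.2], x :: st.2.2))
      ([], [], [])
    = ((rowsL1 l).reverse, (rowsL2 l).reverse, l) := by
  rw [List.foldl_reverse]
  induction l with
  | nil => simp [rowsL1, rowsL2]
  | cons x xs ih =>
    rw [List.foldr_cons, ih]
    simp only [List.length_cons]
    rw [rowsL1_cons, rowsL2_cons]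
    simp

-- ===== VERDICT (by name: the statement is the Claim_ definition above) =====
theorem create_morphing_lists_spec : Claim_equal_create_morphing_lists := by
  intro l _hd
  unfold Spec_create_morphing_lists create_morphing_lists_alt
  rw [A_eq l]
  simp only [B_fold_eq l, List.reverse_reverse, rows1_flat, rows2_flat]
  exact Prod.ext (first_eq l) (second_eq l)
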